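-- pv_equiv track=rewrite | github.com/ato/jvmctl-old | jvmctl/config.py | preprocess_add_header
-- ===== SOURCE A (Python) =====
-- def preprocess_add_header(fp):
--     "Add a [jvmctl] header if we're missing one"
--     sent_header = False
--     for line in fp:
--         if line.strip().startswith('['):
--             sent_header = True
--         if not sent_header and '=' in line:
--             sent_header = True
--             yield '[jvmctl]\n'
--         yield line
-- ===== SOURCE B (Python) =====
-- def _first_assignment_index(lines):
--     """Index of the first 'key=value' line occurring before any section header,
--     or None if a header comes first (or there is no such line)."""
--     for i, line in enumerate(lines):
--         if line.strip().startswith('['):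
--             return None
--         if '=' in line:
--             return i
--     return None
--
--
-- def preprocess_add_header(fp):
--     "Add a [jvmctl] header if we're missing one"
--     lines = list(fp)
--     idx = _first_assignment_index(lines)
--     if idx is None:
--         result = lines
--     else:
--         result = lines[:idx] + ['[jvmctl]\n'] + lines[idx:]
--     yield from result
-- ===== Notes on version B (the rewrite author's own statement) =====
-- stated objective: alternative
-- what changed: Replaces A's stateful flag loop that emits lines as it goes with an index-then-splice algorithm: a helper first locates the index of the first key=value line seen before any section header, and the output is built by slicing the list and inserting the header at that index (or returning the list unchanged).
import Mathlib
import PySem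

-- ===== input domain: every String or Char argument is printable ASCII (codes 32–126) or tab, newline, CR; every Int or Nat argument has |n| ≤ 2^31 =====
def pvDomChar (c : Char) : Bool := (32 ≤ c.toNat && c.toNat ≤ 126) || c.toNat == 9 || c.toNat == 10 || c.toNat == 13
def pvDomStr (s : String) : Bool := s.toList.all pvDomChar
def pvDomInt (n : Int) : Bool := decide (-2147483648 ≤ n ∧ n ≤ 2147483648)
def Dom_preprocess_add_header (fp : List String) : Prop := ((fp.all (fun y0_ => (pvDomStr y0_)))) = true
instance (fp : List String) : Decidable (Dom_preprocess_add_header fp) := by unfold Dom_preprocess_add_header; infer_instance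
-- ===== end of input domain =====

-- B replaces A's stateful flag loop with index-then-splice: find the index of the
-- first '=' line before any header, then insert the header there by slicing (same cost).
-- Return-value equivalence only: both Pythons are generators; B materialises list(fp) first.
-- ===== PORT A =====
def pvALoop (sent : Bool) : List String → List String
  | [] => []
  | line :: rest =>
    let sent1 := if PySem.Str.startswith (PySem.Str.strip line) "[" then true else sent
    if !sent1 && PySem.Str.isIn "=" line then
      "[jvmctl]\n" :: line :: pvALoop true rest
    else
      line :: pvALoop sent1 rest

def preprocess_add_header (fp : List String) : List String := pvALoop false fp

-- ===== PORT B =====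
-- index of the first key=value line occurring before any section header, else none
def pvFirstAssignIdx : List String → Option Nat
  | [] => none
  | line :: rest =>
    if PySem.Str.startswith (PySem.Str.strip line) "[" then none
    else if PySem.Str.isIn "=" line then some 0
    else (pvFirstAssignIdx rest).map (· + 1)

def preprocess_add_header_alt (fp : List String) : List String :=
  match pvFirstAssignIdx fp with
  | none => fp
  | some i => fp.take i ++ "[jvmctl]\n" :: fp.drop i

-- ===== PRECONDITION & SPEC =====
def Spec_preprocess_add_header (fp : List String) (out : List String) : Prop := out = preprocess_add_header_alt fp
instance (fp : List String) (out : List String) : Decidable (Spec_preprocess_add_header fp out) := by unfold Spec_preprocess_add_header; infer_instance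

-- ===== CLAIM (what is proved, stated in full; the proofs are below) =====
def Claim_equal_preprocess_add_header : Prop := ∀ (fp : List String), Dom_preprocess_add_header fp → Spec_preprocess_add_header fp (preprocess_add_header fp)

-- ===== LEMMAS AND PROOFS =====

lemma pvALoop_true (xs : List String) : pvALoop true xs = xs := by
  induction xs with
  | nil => rfl
  | cons l rest ih =>
    simp only [pvALoop]
    split <;> simp_all

lemma pvALoop_eq_alt (fp : List String) : pvALoop false fp = preprocess_add_header_alt fp := by
  induction fp with
  | nil => rfl
  | cons l rest ih =>
    simp only [pvALoop, preprocess_add_header_alt, pvFirstAssignIdx]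
    by_cases h1 : PySem.Chars.startswith (PySem.Chars.strip l.toList) ['['] = true
    · simp [h1, pvALoop_true]
    · by_cases h2 : PySem.Chars.isIn ['='] l.toList = true
      · simp [h1, h2, pvALoop_true]
      · cases h : pvFirstAssignIdx rest with
        | none => simp [h1, h2, h, ih, preprocess_add_header_alt]
        | some i => simp [h1, h2, h, ih, preprocess_add_header_alt]

-- ===== VERDICT =====
theorem preprocess_add_header_spec : Claim_equal_preprocess_add_header := by
  intro fp _
  exact pvALoop_eq_alt fp
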